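-- pv_equiv track=rewrite | github.com/nataliiaborovyk/ITS_Python | Recupero/Rep_05/es_1A.py | caricoNullo
-- ===== SOURCE A (Python) =====
-- def calcolaCarico(matrice:list[list[int]], r:int, c:int) -> int:
--     somma_riga: int = sum(matrice[r])
--     somma_colonna: int = 0
--     for i in range(len(matrice)):
--         for k in range(len(matrice[i])):
--             if k == c:
--                 somma_colonna += matrice[i][k]
--     carico_posizione: int = somma_riga - somma_colonna
--     return carico_posizione
--
-- def caricoNullo(matrice) -> list[tuple[int]]:
--     lista: list[tuple[int]] = []
--     for i in range(len(matrice)):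
--         for k in range(len(matrice[i])):
--             calcolo: int = calcolaCarico(matrice, i, k)
--             if calcolo == 0:
--                 lista.append((i, k))
--     return f"Carico è nullo per indici {lista}"
-- ===== SOURCE B (Python) =====
-- def caricoNullo(matrice) -> str:
--     row_sums = [sum(riga) for riga in matrice]
--     width = max((len(riga) for riga in matrice), default=0)
--     col_sums = [sum(r[k] for r in matrice if k < len(r)) for k in range(width)]
--     lista = [(i, k)
--              for i, (riga, rs) in enumerate(zip(matrice, row_sums))
--              for k in range(len(riga))
--              if rs - col_sums[k] == 0]
--     return f"Carico è nullo per indici {lista}"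
-- ===== Notes on version B (the rewrite author's own statement) =====
-- stated objective: faster
-- what changed: A recomputes the full column sum (a scan of the whole matrix) and the row sum for every single cell; B precomputes all row sums and all column sums once and then decides each cell with one subtraction, building the result as a comprehension instead of nested append loops.
import Mathlib
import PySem

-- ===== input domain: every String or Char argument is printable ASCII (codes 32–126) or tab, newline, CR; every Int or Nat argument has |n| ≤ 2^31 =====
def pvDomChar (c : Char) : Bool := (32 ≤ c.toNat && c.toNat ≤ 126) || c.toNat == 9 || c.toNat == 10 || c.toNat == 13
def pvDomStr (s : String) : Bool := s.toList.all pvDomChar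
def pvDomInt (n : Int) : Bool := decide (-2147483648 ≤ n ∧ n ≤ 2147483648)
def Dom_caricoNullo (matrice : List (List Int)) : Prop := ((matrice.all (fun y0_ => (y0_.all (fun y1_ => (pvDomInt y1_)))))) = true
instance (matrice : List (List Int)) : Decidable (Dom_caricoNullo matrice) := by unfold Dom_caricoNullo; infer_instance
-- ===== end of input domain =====

-- B precomputes every row sum and every column sum once and decides each cell with one
-- subtraction, instead of A's full-matrix column scan per cell (objective: faster).

-- shared rendering of the Python f-string "Carico è nullo per indici {lista}"
def pvReprPairs (lista : List (Int × Int)) : String :=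
  "[" ++ String.intercalate ", "
    (lista.map (fun p => "(" ++ PySem.Int.toStr p.1 ++ ", " ++ PySem.Int.toStr p.2 ++ ")")) ++ "]"

-- ===== PORT A =====
def calcolaCarico (matrice : List (List Int)) (r c : Int) : Int :=
  let somma_riga : Int := (PySem.List.pyGetD matrice r []).sum
  let somma_colonna : Int :=
    matrice.foldl (fun acc riga =>
      (PySem.List.pyRange 0 (riga.length : Int)).foldl (fun acc2 k =>
        if k = c then acc2 + PySem.List.pyGetD riga k 0 else acc2) acc) 0
  somma_riga - somma_colonna

def caricoNullo (matrice : List (List Int)) : String :=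
  let lista : List (Int × Int) :=
    (PySem.List.pyRange 0 (matrice.length : Int)).foldl (fun l i =>
      let riga := PySem.List.pyGetD matrice i []
      (PySem.List.pyRange 0 (riga.length : Int)).foldl (fun l2 k =>
        if calcolaCarico matrice i k = 0 then l2 ++ [(i, k)] else l2) l) []
  "Carico è nullo per indici " ++ pvReprPairs lista

-- ===== PORT B =====
def caricoNullo_alt (matrice : List (List Int)) : String :=
  let rowSums : List Int := matrice.map (fun riga => riga.sum)
  let width : Nat := matrice.foldl (fun a riga => max a riga.length) 0
  let colSums : List Int :=
    (List.range width).map (fun k =>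
      matrice.foldl (fun a r => if k < r.length then a + r.getD k 0 else a) 0)
  let lista : List (Int × Int) :=
    (PySem.List.enumerate (matrice.zip rowSums)).flatMap (fun p =>
      (List.range p.2.1.length).filterMap (fun k =>
        if p.2.2 - colSums.getD k 0 = 0 then some (p.1, (k : Int)) else none))
  "Carico è nullo per indici " ++ pvReprPairs lista

-- ===== PRECONDITION & SPEC =====
def Spec_caricoNullo (matrice : List (List Int)) (out : String) : Prop := out = caricoNullo_alt matrice
instance (matrice : List (List Int)) (out : String) : Decidable (Spec_caricoNullo matrice out) := by unfold Spec_caricoNullo; infer_instance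

-- ===== CLAIM (what is proved, stated in full; the proofs are below) =====
def Claim_equal_caricoNullo : Prop := ∀ (matrice : List (List Int)), Dom_caricoNullo matrice → Spec_caricoNullo matrice (caricoNullo matrice)

-- ===== LEMMAS AND PROOFS =====

-- the column sum of column k (rows shorter than k contribute 0 = their getD default)
def colSpec (m : List (List Int)) (k : Nat) : Int := (m.map (fun r => r.getD k 0)).sum

theorem range_foldl_pick (riga : List Int) (k : Nat) : ∀ (n : Nat) (acc : Int),
    (List.range n).foldl (fun a t => if t = k then a + riga.getD t 0 else a) acc
      = acc + (if k < n then riga.getD k 0 else 0) := by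
  intro n
  induction n with
  | zero => simp
  | succ n ih =>
    intro acc
    rw [List.range_succ, List.foldl_append]
    simp only [List.foldl_cons, List.foldl_nil, ih]
    by_cases h : n = k
    · subst h
      simp
    · have : (k < n) = (k < n + 1) := by
        simp only [eq_iff_iff]; omega
      simp [h, this]

theorem row_pick (riga : List Int) (k : Nat) (acc : Int) :
    (PySem.List.pyRange 0 (riga.length : Int)).foldl
      (fun a t => if t = (k : Int) then a + PySem.List.pyGetD riga t 0 else a) acc
      = acc + riga.getD k 0 := by
  rw [PySem.List.pyRange_zero_nat, List.foldl_map]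
  have : ∀ (a : Int) (t : Nat),
      (if (t : Int) = (k : Int) then a + PySem.List.pyGetD riga (t : Int) 0 else a)
        = (if t = k then a + riga.getD t 0 else a) := by
    intro a t
    simp [PySem.List.pyGetD_natCast]
  rw [PySem.List.foldl_congr_mem _ _ (fun a t => if t = k then a + riga.getD t 0 else a) acc
      (by intro a t _; exact this a t)]
  rw [range_foldl_pick]
  by_cases h : k < riga.length
  · simp [h]
  · simp [h]

theorem colScan_eq_colSpec (m : List (List Int)) (k : Nat) :
    m.foldl (fun acc riga =>
      (PySem.List.pyRange 0 (riga.length : Int)).foldl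
        (fun a t => if t = (k : Int) then a + PySem.List.pyGetD riga t 0 else a) acc) 0
      = colSpec m k := by
  rw [PySem.List.foldl_congr_mem _ _ (fun acc riga => acc + riga.getD k 0) 0
      (by intro acc r _; exact row_pick r k acc)]
  rw [PySem.List.foldl_add]
  simp [colSpec]

theorem calcolaCarico_eq (m : List (List Int)) (r : Int) (k : Nat) :
    calcolaCarico m r (k : Int) = (PySem.List.pyGetD m r []).sum - colSpec m k := by
  unfold calcolaCarico
  rw [colScan_eq_colSpec]

theorem le_foldl_max (l : List (List Int)) : ∀ (acc : Nat), acc ≤ l.foldl (fun a riga => max a riga.length) acc := by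
  induction l with
  | nil => simp
  | cons y ys ih =>
    intro acc
    exact le_trans (le_max_left acc y.length) (ih (max acc y.length))

theorem length_le_width (m : List (List Int)) : ∀ (acc : Nat) (r : List Int), r ∈ m →
    r.length ≤ m.foldl (fun a riga => max a riga.length) acc := by
  induction m with
  | nil => simp
  | cons x xs ih =>
    intro acc r hr
    rcases List.mem_cons.mp hr with h | h
    · subst h
      simp only [List.foldl_cons]
      exact le_trans (le_max_right acc r.length) (le_foldl_max xs _)
    · exact ih (max acc x.length) r h

theorem colEntry_eq_colSpec (m : List (List Int)) (k : Nat) :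
    m.foldl (fun a r => if k < r.length then a + r.getD k 0 else a) 0 = colSpec m k := by
  rw [PySem.List.foldl_congr_mem _ _ (fun a r => a + r.getD k 0) 0
      (by
        intro a r _
        by_cases h : k < r.length
        · simp [h]
        · simp [h])]
  rw [PySem.List.foldl_add]
  simp [colSpec]

theorem filterMap_if {α β : Type} (p : α → Prop) [DecidablePred p] (f : α → β) (l : List α) :
    l.filterMap (fun x => if p x then some (f x) else none)
      = (l.filter (fun x => decide (p x))).map f := by
  induction l with
  | nil => rfl
  | cons x xs ih =>
    by_cases h : p x <;> simp [h, ih]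

theorem flatMap_congr_mem {α β : Type} (l : List α) (f g : α → List β)
    (h : ∀ x ∈ l, f x = g x) : l.flatMap f = l.flatMap g := by
  induction l with
  | nil => rfl
  | cons x xs ih =>
    simp only [List.flatMap_cons, h x (List.mem_cons_self), ih (fun y hy => h y (List.mem_cons_of_mem x hy))]

theorem listaA_canon (m : List (List Int)) :
    (PySem.List.pyRange 0 (m.length : Int)).foldl (fun l i =>
      let riga := PySem.List.pyGetD m i []
      (PySem.List.pyRange 0 (riga.length : Int)).foldl (fun l2 k =>
        if calcolaCarico m i k = 0 then l2 ++ [(i, k)] else l2) l) []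
    = (List.range m.length).flatMap (fun j =>
        ((List.range (m.getD j []).length).filter
          (fun (t : Nat) => decide (calcolaCarico m (j : Int) (t : Int) = 0))).map
          (fun (t : Nat) => ((j : Int), (t : Int)))) := by
  rw [PySem.List.pyRange_zero_nat, List.foldl_map]
  rw [PySem.List.foldl_congr_mem _ _
      (fun l (j : Nat) =>
        l ++ ((List.range (m.getD j []).length).filter
          (fun (t : Nat) => decide (calcolaCarico m (j : Int) (t : Int) = 0))).map
          (fun (t : Nat) => ((j : Int), (t : Int)))) []
      (by
        intro l j _
        simp only [PySem.List.pyGetD_natCast]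
        rw [PySem.List.pyRange_zero_nat, List.foldl_map]
        exact PySem.List.foldl_append_ite
          (fun t : Nat => calcolaCarico m (j : Int) (t : Int) = 0)
          (fun t : Nat => ((j : Int), (t : Int))) _ l)]
  rw [PySem.List.foldl_append_eq_flatMap]
  simp

theorem listaB_canon (m : List (List Int)) (cs : List Int) :
    (PySem.List.enumerate (m.zip (m.map (fun riga => riga.sum)))).flatMap (fun p =>
      (List.range p.2.1.length).filterMap (fun k =>
        if p.2.2 - cs.getD k 0 = 0 then some (p.1, (k : Int)) else none))
    = (List.range m.length).flatMap (fun j =>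
        (List.range (m.getD j []).length).filterMap (fun (k : Nat) =>
          if (m.getD j []).sum - cs.getD k 0 = 0 then some ((j : Int), (k : Int)) else none)) := by
  rw [PySem.List.enumerate_eq_map_pyRange _ ([], 0)]
  have hlen : PySem.List.len (m.zip (m.map (fun riga => riga.sum))) = (m.length : Int) := by
    simp [PySem.List.len]
  rw [hlen, PySem.List.pyRange_zero_nat, List.map_map, List.flatMap_map]
  apply flatMap_congr_mem
  intro j hj
  have hj' : j < m.length := List.mem_range.mp hj
  have hz : (m.zip (m.map (fun riga => riga.sum))).getD j ([], 0)
      = (m.getD j [], (m.getD j []).sum) := by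
    have hlz : j < (m.zip (m.map (fun riga => riga.sum))).length := by
      simp [List.length_zip, hj']
    rw [List.getD_eq_getElem _ _ hlz, List.getElem_zip]
    simp [List.getElem?_eq_getElem hj']
  simp only [Function.comp, PySem.List.pyGetD_natCast, hz]

theorem caricoNullo_main (m : List (List Int)) : caricoNullo m = caricoNullo_alt m := by
  unfold caricoNullo caricoNullo_alt
  apply congrArg (fun l => "Carico è nullo per indici " ++ pvReprPairs l)
  rw [listaA_canon, listaB_canon]
  apply flatMap_congr_mem
  intro j hj
  have hj' : j < m.length := List.mem_range.mp hj
  rw [filterMap_if (fun (k : Nat) => (m.getD j []).sum -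
        ((List.range (m.foldl (fun a riga => max a riga.length) 0)).map
          (fun k => m.foldl (fun a r => if k < r.length then a + r.getD k 0 else a) 0)).getD k 0 = 0)
      (fun (k : Nat) => ((j : Int), (k : Int)))]
  apply congrArg
  apply List.filter_congr
  intro t ht
  have ht' : t < (m.getD j []).length := List.mem_range.mp ht
  have hwid : (m.getD j []).length ≤ m.foldl (fun a riga => max a riga.length) 0 := by
    apply length_le_width
    rw [List.getD_eq_getElem _ _ hj']
    exact List.getElem_mem hj'
  have hcs : ((List.range (m.foldl (fun a riga => max a riga.length) 0)).map
      (fun k => m.foldl (fun a r => if k < r.length then a + r.getD k 0 else a) 0)).getD t 0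
      = colSpec m t := by
    rw [PySem.List.getD_map_range _ _ _ _ (lt_of_lt_of_le ht' hwid), colEntry_eq_colSpec]
  rw [calcolaCarico_eq]
  simp only [PySem.List.pyGetD_natCast, hcs]

-- ===== VERDICT (by name: the statement is the Claim_ definition above) =====
theorem caricoNullo_spec : Claim_equal_caricoNullo := by
  intro m _
  unfold Spec_caricoNullo
  exact caricoNullo_main m
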